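-- pv_equiv track=rewrite | github.com/Robinbinu/fasttts-api | scripts/web_vlm_tts.py | find_phrase_break
-- ===== SOURCE A (Python) =====
-- MIN_CHUNK_SIZE = 15
--
-- def find_phrase_break(text, min_size=MIN_CHUNK_SIZE):
--     """Find the earliest natural break point in text"""
--     if len(text) < min_size:
--         return None
--
--     # High priority: sentence endings
--     for i, char in enumerate(text):
--         if i < min_size:
--             continue
--
--         if char in '.!?':
--             rest = text[i+1:]
--             if not rest.strip():
--                 return None
--
--             j = 0
--             while j < len(rest) and rest[j] in ' \t"\'\n':
--                 j += 1
--
--             if j < len(rest):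
--                 return i + 1
--
--     # Medium priority: phrase breaks
--     for i, char in enumerate(text):
--         if i < min_size:
--             continue
--
--         if char in ',;:':
--             rest = text[i+1:]
--             if rest.strip() and len(rest.strip()) >= 3:
--                 return i + 1
--
--     # Low priority: newlines
--     if len(text) > min_size * 2:
--         newline_pos = text.find('\n', min_size)
--         if newline_pos != -1 and newline_pos < len(text) - 2:
--             return newline_pos + 1
--
--     # Fallback: word boundary
--     if len(text) > min_size * 3:
--         search_end = min(len(text), min_size * 3)
--         last_space = text.rfind(' ', min_size, search_end)
--         if last_space != -1:
--             return last_space + 1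
--
--     return None
-- ===== SOURCE B (Python) =====
-- MIN_CHUNK_SIZE = 15
--
-- def find_phrase_break(text, min_size=MIN_CHUNK_SIZE):
--     """Find the earliest natural break point in text (one pre-pass; decide at the first candidate of each class)."""
--     n = len(text)
--     if n < min_size:
--         return None
--
--     # One linear pre-pass: last index holding a non-whitespace char, and the
--     # last index holding a char outside the quote/whitespace skip set.
--     last_nonws = -1
--     last_solid = -1
--     for j, c in enumerate(text):
--         if c not in ' \t\n\r':
--             last_nonws = j
--         if c not in ' \t"\'\n':
--             last_solid = j
--
--     start = max(min_size, 0)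
--
--     # High priority: only the FIRST sentence-ending char at index >= min_size
--     # can decide (everything after a failing one lies in the skip set, which
--     # contains no sentence-ending chars).
--     for i in range(start, n):
--         if text[i] in '.!?':
--             if last_nonws <= i:
--                 return None
--             if last_solid > i:
--                 return i + 1
--             break
--
--     # Medium priority: only the FIRST phrase-break char matters (the stripped
--     # tail only shrinks for later candidates).
--     for i in range(start, n):
--         if text[i] in ',;:':
--             k = i + 1
--             while k < n and text[k] in ' \t\n\r':
--                 k += 1
--             if last_nonws - k >= 2:
--                 return i + 1
--             break
--
--     # Low priority: newlines
--     if n > min_size * 2: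
--         newline_pos = text.find('\n', min_size)
--         if newline_pos != -1 and newline_pos < n - 2:
--             return newline_pos + 1
--
--     # Fallback: word boundary
--     if n > min_size * 3:
--         last_space = text.rfind(' ', min_size, min(n, min_size * 3))
--         if last_space != -1:
--             return last_space + 1
--
--     return None
-- ===== Notes on version B (the rewrite author's own statement) =====
-- stated objective: alternative
-- what changed: A slices the text and strips the remainder afresh at every punctuation candidate; B does one linear pre-pass recording the last non-whitespace and last non-skip index and decides at the first candidate of each priority class (later candidates provably cannot fire once the first fails).
import Mathlib
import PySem

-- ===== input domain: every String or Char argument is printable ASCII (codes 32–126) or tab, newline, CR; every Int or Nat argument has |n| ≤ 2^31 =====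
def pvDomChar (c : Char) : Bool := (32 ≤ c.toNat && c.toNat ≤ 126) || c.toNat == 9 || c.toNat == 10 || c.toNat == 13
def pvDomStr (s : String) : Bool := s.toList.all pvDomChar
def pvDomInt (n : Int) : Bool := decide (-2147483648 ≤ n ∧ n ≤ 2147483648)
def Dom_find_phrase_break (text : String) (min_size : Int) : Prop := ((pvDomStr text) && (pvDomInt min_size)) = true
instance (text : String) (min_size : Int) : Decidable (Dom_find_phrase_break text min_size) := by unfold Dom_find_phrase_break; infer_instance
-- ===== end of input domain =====

-- B replaces A's per-candidate slice+strip re-scans by one linear pre-pass recording the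
-- last non-whitespace / last non-skip index, then decides at the FIRST candidate of each
-- priority class; objective: alternative (different algorithm, similar measured cost).

-- ===== PORT A =====

-- '.!?', ',;:', ' \t"\'\n' as character lists
def pvSent : List Char := ['.', '!', '?']
def pvPhrase : List Char := [',', ';', ':']
def pvSkip : List Char := [' ', '\t', '"', '\'', '\n']

-- A's inner while loop: j = 0; while j < len(rest) and rest[j] in ' \t"\'\n': j += 1
def pvAwhile (r : List Char) (j : Nat) : Nat :=
  if h : j < r.length then
    if r[j] ∈ pvSkip then pvAwhile r (j + 1) else j
  else j
termination_by r.length - j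

-- A's first for-loop; `some none` = "return None", `some (some v)` = "return v", `none` = fall through
def pvAloop1 (cs : List Char) (min_size : Int) : List (Int × Char) → Option (Option Int)
  | [] => none
  | (i, c) :: rest =>
    if i < min_size then pvAloop1 cs min_size rest
    else if c ∈ pvSent then
      let r := PySem.List.slice cs (some (i + 1)) none
      if PySem.Chars.strip r = [] then some none
      else
        let j := pvAwhile r 0
        if j < r.length then some (some (i + 1)) else pvAloop1 cs min_size rest
    else pvAloop1 cs min_size rest

-- A's second for-loop
def pvAloop2 (cs : List Char) (min_size : Int) : List (Int × Char) → Option Int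
  | [] => none
  | (i, c) :: rest =>
    if i < min_size then pvAloop2 cs min_size rest
    else if c ∈ pvPhrase then
      let s := PySem.Chars.strip (PySem.List.slice cs (some (i + 1)) none)
      if s ≠ [] ∧ 3 ≤ s.length then some (i + 1) else pvAloop2 cs min_size rest
    else pvAloop2 cs min_size rest

def find_phrase_break (text : String) (min_size : Int) : Option Int :=
  let cs := text.toList
  let n : Int := (cs.length : Int)
  if n < min_size then none
  else
    match pvAloop1 cs min_size (PySem.List.enumerate cs 0) with
    | some r => r
    | none =>
      match pvAloop2 cs min_size (PySem.List.enumerate cs 0) with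
      | some v => some v
      | none =>
        let p3 : Option Int :=
          if min_size * 2 < n then
            let newline_pos := PySem.Chars.findFrom cs ['\n'] min_size none
            if newline_pos ≠ -1 ∧ newline_pos < n - 2 then some (newline_pos + 1) else none
          else none
        match p3 with
        | some v => some v
        | none =>
          if min_size * 3 < n then
            let last_space := PySem.Chars.rfindFrom cs [' '] min_size (some (min n (min_size * 3)))
            if last_space ≠ -1 then some (last_space + 1) else none
          else none

-- ===== PORT B =====

-- ' \t\n\r' (the whitespace characters of the input domain)
def pvWS : List Char := [' ', '\t', '\n', '\r']

-- B's pre-pass: last index of a non-whitespace char, last index of a char outside the skip set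
def pvBlasts (cs : List Char) : Int × Int :=
  (PySem.List.enumerate cs 0).foldl
    (fun p jc =>
      ((if jc.2 ∉ pvWS then jc.1 else p.1),
       (if jc.2 ∉ pvSkip then jc.1 else p.2)))
    (-1, -1)

-- B's first loop: only the first sentence-ending char at index ≥ start can decide (then break)
def pvBscan1 (last_nonws last_solid : Int) : List Char → Nat → Option (Option Int)
  | [], _ => none
  | c :: rest, i =>
    if c ∈ pvSent then
      if last_nonws ≤ (i : Int) then some none
      else if (i : Int) < last_solid then some (some ((i : Int) + 1))
      else none
    else pvBscan1 last_nonws last_solid rest (i + 1)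

-- B's inner while loop: while k < n and text[k] in ' \t\n\r': k += 1
def pvBwhileK (cs : List Char) (k : Nat) : Nat :=
  if h : k < cs.length then
    if cs[k] ∈ pvWS then pvBwhileK cs (k + 1) else k
  else k
termination_by cs.length - k

-- B's second loop: only the first phrase-break char matters (then break)
def pvBscan2 (cs : List Char) (last_nonws : Int) : List Char → Nat → Option Int
  | [], _ => none
  | c :: rest, i =>
    if c ∈ pvPhrase then
      let k := pvBwhileK cs (i + 1)
      if 2 ≤ last_nonws - (k : Int) then some ((i : Int) + 1) else none
    else pvBscan2 cs last_nonws rest (i + 1)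

def find_phrase_break_alt (text : String) (min_size : Int) : Option Int :=
  let cs := text.toList
  let n : Int := (cs.length : Int)
  if n < min_size then none
  else
    let lasts := pvBlasts cs
    let start := (max min_size 0).toNat
    match pvBscan1 lasts.1 lasts.2 (cs.drop start) start with
    | some r => r
    | none =>
      match pvBscan2 cs lasts.1 (cs.drop start) start with
      | some v => some v
      | none =>
        let p3 : Option Int :=
          if min_size * 2 < n then
            let newline_pos := PySem.Chars.findFrom cs ['\n'] min_size none
            if newline_pos ≠ -1 ∧ newline_pos < n - 2 then some (newline_pos + 1) else none
          else none
        match p3 with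
        | some v => some v
        | none =>
          if min_size * 3 < n then
            let last_space := PySem.Chars.rfindFrom cs [' '] min_size (some (min n (min_size * 3)))
            if last_space ≠ -1 then some (last_space + 1) else none
          else none

-- ===== PRECONDITION & SPEC =====
def Spec_find_phrase_break (text : String) (min_size : Int) (out : Option Int) : Prop := out = find_phrase_break_alt text min_size
instance (text : String) (min_size : Int) (out : Option Int) : Decidable (Spec_find_phrase_break text min_size out) := by unfold Spec_find_phrase_break; infer_instance

-- ===== CLAIM (what is proved, stated in full; the proofs are below) =====
def Claim_equal_find_phrase_break : Prop := ∀ (text : String) (min_size : Int), Dom_find_phrase_break text min_size → Spec_find_phrase_break text min_size (find_phrase_break text min_size)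


-- ===== LEMMAS AND PROOFS =====

-- character-class facts
theorem pv_dom_isspace (c : Char) (h : pvDomChar c = true) :
    (PySem.Chars.isspace c = true) ↔ c ∈ pvWS := by
  simp only [pvDomChar, Bool.or_eq_true, Bool.and_eq_true, decide_eq_true_eq, beq_iff_eq] at h
  have hc := (Char.ofNat_toNat c).symm
  constructor
  · intro hs
    simp only [PySem.Chars.isspace, Bool.or_eq_true, Bool.and_eq_true, decide_eq_true_eq] at hs
    have : c.toNat = 32 ∨ c.toNat = 9 ∨ c.toNat = 10 ∨ c.toNat = 13 := by omega
    rcases this with h' | h' | h' | h' <;> (rw [hc, h']; decide)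
  · intro hm
    fin_cases hm <;> decide

theorem pv_skip_not_sent {c : Char} (h : c ∈ pvSkip) : c ∉ pvSent := by
  fin_cases h <;> decide

-- takeWhile index facts
theorem pv_tw_mem (p : Char → Bool) (l : List Char) (i : Nat)
    (hi : i < (l.takeWhile p).length) (hl : i < l.length) : p (l[i]'hl) = true := by
  have h1 : p ((l.takeWhile p)[i]'hi) = true := List.mem_takeWhile_imp (List.getElem_mem hi)
  rwa [(List.takeWhile_prefix p).getElem] at h1

theorem pv_tw_next_false (p : Char → Bool) (l : List Char)
    (h : (l.takeWhile p).length < l.length) : ¬ p (l[(l.takeWhile p).length]'h) = true := by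
  intro hp
  have hsplit := List.takeWhile_append_dropWhile (p := p) (l := l)
  obtain ⟨d, ds, hd⟩ : ∃ d ds, List.dropWhile p l = d :: ds := by
    cases hdw : List.dropWhile p l with
    | nil => exfalso; have := congrArg List.length hsplit; simp [hdw] at this; omega
    | cons d ds => exact ⟨d, ds, rfl⟩
  have hdfalse : p d = false := by
    have := List.head?_dropWhile_not p l
    rw [hd] at this; simpa using this
  rw [hd] at hsplit
  have hq : (List.takeWhile p l ++ d :: ds)[(l.takeWhile p).length]? = some d := by
    rw [List.getElem?_append_right (le_refl _)]; simp
  rw [hsplit, List.getElem?_eq_getElem h] at hq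
  simp at hq
  rw [hq] at hp
  simp [hdfalse] at hp

-- membership in a drop, index form
theorem pv_forall_drop (cs : List Char) (d : Nat) (P : Char → Prop) :
    (∀ c ∈ cs.drop d, P c) ↔ (∀ j : Nat, (hj : j < cs.length) → d ≤ j → P (cs[j]'hj)) := by
  constructor
  · intro H j hj hdj
    have hj' : j - d < (cs.drop d).length := by simp [List.length_drop]; omega
    have hel : (cs.drop d)[j - d]'hj' = cs[j]'hj := by
      rw [List.getElem_drop]
      congr 1
      omega
    exact hel ▸ H _ (List.getElem_mem hj')
  · intro H c hc
    rw [List.mem_iff_getElem] at hc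
    obtain ⟨t, ht, rfl⟩ := hc
    have := H (d + t) (by simp [List.length_drop] at ht; omega) (by omega)
    simpa [List.getElem_drop] using this

theorem pv_exists_drop (cs : List Char) (d : Nat) (P : Char → Prop) :
    (∃ c ∈ cs.drop d, P c) ↔ (∃ j : Nat, ∃ hj : j < cs.length, d ≤ j ∧ P (cs[j]'hj)) := by
  constructor
  · intro ⟨c, hc, hP⟩
    rw [List.mem_iff_getElem] at hc
    obtain ⟨t, ht, rfl⟩ := hc
    refine ⟨d + t, by simp [List.length_drop] at ht; omega, by omega, ?_⟩
    simpa [List.getElem_drop] using hP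
  · intro ⟨j, hj, hdj, hP⟩
    have hj' : j - d < (cs.drop d).length := by simp [List.length_drop]; omega
    have hel : (cs.drop d)[j - d]'hj' = cs[j]'hj := by
      rw [List.getElem_drop]; congr 1; omega
    exact ⟨_, List.getElem_mem hj', hel ▸ hP⟩

-- the "last index with property f" accumulator loop
def pvLastIdx (f : Char → Bool) : List Char → Nat → Int → Int
  | [], _, acc => acc
  | c :: tl, s, acc => pvLastIdx f tl (s + 1) (if f c then (s : Int) else acc)

theorem pvLastIdx_ge (f : Char → Bool) :
    ∀ (cs : List Char) (s : Nat) (acc : Int), acc ≤ (s : Int) → acc ≤ pvLastIdx f cs s acc := by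
  intro cs
  induction cs with
  | nil => intro s acc h; exact le_refl acc
  | cons c tl ih =>
    intro s acc h
    have h2 : (if f c then (s : Int) else acc) ≤ ((s + 1 : Nat) : Int) := by
      split <;> push_cast <;> omega
    have := ih (s + 1) (if f c then (s : Int) else acc) h2
    have h3 : acc ≤ (if f c then (s : Int) else acc) := by split <;> omega
    exact le_trans h3 this

theorem pvLastIdx_le_iff (f : Char → Bool) :
    ∀ (cs : List Char) (s : Nat) (acc i : Int), acc ≤ i →
      (pvLastIdx f cs s acc ≤ i ↔
        ∀ j : Nat, (hj : j < cs.length) → i < (s : Int) + j → f (cs[j]'hj) = false) := by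
  intro cs
  induction cs with
  | nil =>
    intro s acc i h
    simp only [pvLastIdx]
    exact iff_of_true h (by intro j hj; simp at hj)
  | cons c tl ih =>
    intro s acc i h
    simp only [pvLastIdx]
    by_cases hf : f c
    · rw [if_pos hf]
      by_cases hi : (s : Int) ≤ i
      · rw [ih (s + 1) s i hi]
        constructor
        · intro H j hj hlt
          cases j with
          | zero => exfalso; simp at hlt; omega
          | succ j =>
            have := H j (by simpa using hj) (by push_cast at hlt ⊢; omega)
            simpa using this
        · intro H j hj hlt
          have := H (j + 1) (by simpa using hj) (by push_cast at hlt ⊢; omega)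
          simpa using this
      · push Not at hi
        have hge : (s : Int) ≤ pvLastIdx f tl (s + 1) s := pvLastIdx_ge f tl (s + 1) s (by push_cast; omega)
        refine iff_of_false (by omega) ?_
        intro H
        have := H 0 (by simp) (by simpa using hi)
        simp [hf] at this
    · rw [if_neg hf]
      rw [ih (s + 1) acc i h]
      constructor
      · intro H j hj hlt
        cases j with
        | zero => simpa using (eq_false_of_ne_true hf)
        | succ j =>
          have := H j (by simpa using hj) (by push_cast at hlt ⊢; omega)
          simpa using this
      · intro H j hj hlt
        have := H (j + 1) (by simpa using hj) (by push_cast at hlt ⊢; omega)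
        simpa using this

theorem pvBlasts_aux :
    ∀ (cs : List Char) (s : Nat) (p : Int × Int),
      (PySem.List.enumerate cs (s : Int)).foldl
          (fun p jc =>
            ((if jc.2 ∉ pvWS then jc.1 else p.1),
             (if jc.2 ∉ pvSkip then jc.1 else p.2))) p =
        (pvLastIdx (fun c => decide (c ∉ pvWS)) cs s p.1,
         pvLastIdx (fun c => decide (c ∉ pvSkip)) cs s p.2) := by
  intro cs
  induction cs with
  | nil => intro s p; simp [PySem.List.enumerate, pvLastIdx]
  | cons c tl ih =>
    intro s p
    rw [PySem.List.enumerate_cons, List.foldl_cons]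
    have hcast : (s : Int) + 1 = ((s + 1 : Nat) : Int) := by push_cast; ring
    rw [hcast, ih (s + 1)]
    simp only [pvLastIdx, decide_eq_true_eq]

theorem pvBlasts_eq (cs : List Char) :
    pvBlasts cs = (pvLastIdx (fun c => decide (c ∉ pvWS)) cs 0 (-1),
                   pvLastIdx (fun c => decide (c ∉ pvSkip)) cs 0 (-1)) := by
  have := pvBlasts_aux cs 0 (-1, -1)
  simpa [pvBlasts] using this

theorem pv_ln_le_iff (cs : List Char) (hdom : ∀ c ∈ cs, pvDomChar c = true) (t : Nat) :
    (pvBlasts cs).1 ≤ (t : Int) ↔ ∀ c ∈ cs.drop (t + 1), PySem.Chars.isspace c = true := by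
  rw [pvBlasts_eq]
  rw [pvLastIdx_le_iff (fun c => decide (c ∉ pvWS)) cs 0 (-1) (t : Int) (by omega)]
  rw [pv_forall_drop cs (t + 1) (fun c => PySem.Chars.isspace c = true)]
  constructor
  · intro H j hj hdj
    have := H j hj (by push_cast; omega)
    simp only [decide_eq_false_iff_not, not_not] at this
    exact (pv_dom_isspace _ (hdom _ (List.getElem_mem hj))).2 this
  · intro H j hj hlt
    simp only [decide_eq_false_iff_not, not_not]
    exact (pv_dom_isspace _ (hdom _ (List.getElem_mem hj))).1 (H j hj (by push_cast at hlt; omega))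

theorem pv_ls_lt_iff (cs : List Char) (t : Nat) :
    (t : Int) < (pvBlasts cs).2 ↔ ∃ c ∈ cs.drop (t + 1), c ∉ pvSkip := by
  rw [← not_le, pvBlasts_eq]
  simp only
  rw [pvLastIdx_le_iff (fun c => decide (c ∉ pvSkip)) cs 0 (-1) (t : Int) (by omega)]
  rw [pv_exists_drop cs (t + 1) (fun c => c ∉ pvSkip)]
  push Not
  constructor
  · intro ⟨j, hj, hlt, hne⟩
    refine ⟨j, hj, by push_cast at hlt; omega, ?_⟩
    simpa using hne
  · intro ⟨j, hj, hdj, hns⟩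
    refine ⟨j, hj, by push_cast; omega, ?_⟩
    simpa using hns

-- strip facts
theorem pv_strip_eq_nil_iff (l : List Char) :
    PySem.Chars.strip l = [] ↔ ∀ c ∈ l, PySem.Chars.isspace c = true := by
  simp only [PySem.Chars.strip, PySem.Chars.rstrip, PySem.Chars.lstrip,
    List.reverse_eq_nil_iff, List.dropWhile_eq_nil_iff, List.mem_reverse]
  constructor
  · intro H c hc
    rcases List.mem_append.1 ((List.takeWhile_append_dropWhile
        (p := PySem.Chars.isspace) (l := l)) ▸ hc) with h1 | h2
    · exact List.mem_takeWhile_imp h1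
    · exact H c h2
  · intro H c hc
    exact H c ((List.dropWhile_sublist _).subset hc)

theorem pv_length_rstrip (l : List Char) :
    (PySem.Chars.rstrip l).length = l.length - (l.reverse.takeWhile PySem.Chars.isspace).length := by
  simp only [PySem.Chars.rstrip, List.length_reverse]
  have := congrArg List.length (List.takeWhile_append_dropWhile
      (p := PySem.Chars.isspace) (l := l.reverse))
  simp only [List.length_append, List.length_reverse] at this
  omega

theorem pv_three_le_rstrip_iff (l : List Char) :
    3 ≤ (PySem.Chars.rstrip l).length ↔
      ∃ j : Nat, ∃ hj : j < l.length, 2 ≤ j ∧ ¬ (PySem.Chars.isspace (l[j]'hj) = true) := by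
  rw [pv_length_rstrip]
  have hTle : (l.reverse.takeWhile PySem.Chars.isspace).length ≤ l.length := by
    have := (List.takeWhile_sublist (p := PySem.Chars.isspace) (l := l.reverse)).length_le
    simpa using this
  constructor
  · intro h3
    have hT : (l.reverse.takeWhile PySem.Chars.isspace).length < l.reverse.length := by
      simp only [List.length_reverse]; omega
    have hrev := pv_tw_next_false PySem.Chars.isspace l.reverse hT
    rw [List.getElem_reverse] at hrev
    refine ⟨l.length - 1 - (l.reverse.takeWhile PySem.Chars.isspace).length, by omega, by omega, ?_⟩
    convert hrev using 3
  · intro ⟨j, hj, h2j, hns⟩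
    have hi : l.length - 1 - j < l.reverse.length := by simp only [List.length_reverse]; omega
    have hel : l.reverse[l.length - 1 - j]'hi = l[j]'hj := by
      rw [List.getElem_reverse]
      congr 1
      omega
    by_contra hlt
    have hTgt : l.length - 1 - j < (l.reverse.takeWhile PySem.Chars.isspace).length := by omega
    have := pv_tw_mem PySem.Chars.isspace l.reverse (l.length - 1 - j) hTgt hi
    rw [hel] at this
    exact hns this

-- while-loop specifications
theorem pvAwhile_lt_iff (r : List Char) (j : Nat) (h : j ≤ r.length) :
    pvAwhile r j < r.length ↔ ∃ t : Nat, ∃ ht : t < r.length, j ≤ t ∧ r[t]'ht ∉ pvSkip := by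
  fun_induction pvAwhile r j with
  | case1 j hlt hskip ih =>
    rw [ih (by omega)]
    constructor
    · intro ⟨t, ht, hjt, hns⟩
      exact ⟨t, ht, by omega, hns⟩
    · intro ⟨t, ht, hjt, hns⟩
      refine ⟨t, ht, ?_, hns⟩
      rcases Nat.eq_or_lt_of_le hjt with rfl | hlt'
      · exact absurd hskip hns
      · omega
  | case2 j hlt hns =>
    exact iff_of_true hlt ⟨j, hlt, le_refl j, hns⟩
  | case3 j hge =>
    refine iff_of_false (by omega) ?_
    intro ⟨t, ht, hjt, _⟩
    omega

theorem pvBwhileK_ge (cs : List Char) (k : Nat) : k ≤ pvBwhileK cs k := by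
  fun_induction pvBwhileK cs k with
  | case1 k hlt hws ih => omega
  | case2 k hlt hws => exact le_refl k
  | case3 k hge => exact le_refl k

theorem pvBwhileK_le (cs : List Char) (k : Nat) (h : k ≤ cs.length) : pvBwhileK cs k ≤ cs.length := by
  fun_induction pvBwhileK cs k with
  | case1 k hlt hws ih => exact ih (by omega)
  | case2 k hlt hws => omega
  | case3 k hge => omega

theorem pvBwhileK_dropWhile (cs : List Char) (k : Nat) (h : k ≤ cs.length) :
    List.dropWhile (fun c => decide (c ∈ pvWS)) (cs.drop k) = cs.drop (pvBwhileK cs k) := by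
  fun_induction pvBwhileK cs k with
  | case1 k hlt hws ih =>
    rw [List.drop_eq_getElem_cons hlt, List.dropWhile_cons]
    rw [if_pos (by simpa using hws)]
    exact ih (by omega)
  | case2 k hlt hws =>
    rw [List.drop_eq_getElem_cons hlt, List.dropWhile_cons]
    rw [if_neg (by simpa using hws)]
  | case3 k hge =>
    rw [List.drop_eq_nil_of_le (by omega)]
    rfl

theorem pvBwhileK_step (cs : List Char) (k : Nat) : pvBwhileK cs k ≤ pvBwhileK cs (k + 1) := by
  by_cases hlt : k < cs.length
  · by_cases hws : cs[k] ∈ pvWS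
    · have : pvBwhileK cs k = pvBwhileK cs (k + 1) := by
        rw [pvBwhileK]
        rw [dif_pos hlt, if_pos hws]
      omega
    · have : pvBwhileK cs k = k := by
        rw [pvBwhileK]
        rw [dif_pos hlt, if_neg hws]
      have h2 := pvBwhileK_ge cs (k + 1)
      omega
  · have h1 : pvBwhileK cs k = k := by rw [pvBwhileK]; rw [dif_neg hlt]
    have h2 := pvBwhileK_ge cs (k + 1)
    omega

theorem pv_dropWhile_dom (l : List Char) (hdom : ∀ c ∈ l, pvDomChar c = true) :
    List.dropWhile PySem.Chars.isspace l = List.dropWhile (fun c => decide (c ∈ pvWS)) l := by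
  induction l with
  | nil => rfl
  | cons c tl ih =>
    have hc := pv_dom_isspace c (hdom c (by simp))
    simp only [List.dropWhile_cons]
    by_cases hsp : PySem.Chars.isspace c = true
    · rw [if_pos hsp, if_pos (by simpa using hc.1 hsp)]
      exact ih (fun x hx => hdom x (by simp [hx]))
    · rw [if_neg hsp, if_neg (by simpa using fun hm => hsp (hc.2 hm))]

-- condition equivalences at a candidate index t
theorem pv_cond1a (cs : List Char) (hdom : ∀ c ∈ cs, pvDomChar c = true) (t : Nat) :
    PySem.Chars.strip (cs.drop (t + 1)) = [] ↔ (pvBlasts cs).1 ≤ (t : Int) := by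
  rw [pv_strip_eq_nil_iff, pv_ln_le_iff cs hdom t]

theorem pv_cond1b (cs : List Char) (t : Nat) :
    pvAwhile (cs.drop (t + 1)) 0 < (cs.drop (t + 1)).length ↔ (t : Int) < (pvBlasts cs).2 := by
  rw [pvAwhile_lt_iff _ 0 (Nat.zero_le _), pv_ls_lt_iff cs t]
  constructor
  · intro ⟨u, hu, _, hns⟩
    exact ⟨_, List.getElem_mem hu, hns⟩
  · intro ⟨c, hc, hns⟩
    rw [List.mem_iff_getElem] at hc
    obtain ⟨u, hu, rfl⟩ := hc
    exact ⟨u, hu, Nat.zero_le _, hns⟩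

theorem pv_cond2 (cs : List Char) (hdom : ∀ c ∈ cs, pvDomChar c = true) (t : Nat)
    (ht : t < cs.length) :
    (PySem.Chars.strip (cs.drop (t + 1)) ≠ [] ∧ 3 ≤ (PySem.Chars.strip (cs.drop (t + 1))).length) ↔
      2 ≤ (pvBlasts cs).1 - ((pvBwhileK cs (t + 1) : Nat) : Int) := by
  have hk1 : t + 1 ≤ pvBwhileK cs (t + 1) := pvBwhileK_ge cs (t + 1)
  have hk2 : pvBwhileK cs (t + 1) ≤ cs.length := pvBwhileK_le cs (t + 1) (by omega)
  set k := pvBwhileK cs (t + 1) with hk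
  have hstrip : PySem.Chars.strip (cs.drop (t + 1)) = PySem.Chars.rstrip (cs.drop k) := by
    simp only [PySem.Chars.strip, PySem.Chars.lstrip]
    rw [pv_dropWhile_dom _ (fun c hc => hdom c (List.mem_of_mem_drop hc)), hk,
      pvBwhileK_dropWhile cs (t + 1) (by omega)]
  rw [hstrip]
  have h1 : (PySem.Chars.rstrip (cs.drop k) ≠ [] ∧
      3 ≤ (PySem.Chars.rstrip (cs.drop k)).length) ↔
      3 ≤ (PySem.Chars.rstrip (cs.drop k)).length := by
    constructor
    · exact fun h => h.2
    · intro h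
      refine ⟨?_, h⟩
      intro hnil
      rw [hnil] at h
      simp at h
  rw [h1, pv_three_le_rstrip_iff]
  have h2 : (2 ≤ (pvBlasts cs).1 - (k : Int)) ↔ ¬ ((pvBlasts cs).1 ≤ ((k + 1 : Nat) : Int)) := by
    push_cast
    omega
  rw [h2, pv_ln_le_iff cs hdom (k + 1)]
  rw [pv_forall_drop]
  constructor
  · intro ⟨j, hj, h2j, hns⟩ H
    have hjlen : k + j < cs.length := by simp [List.length_drop] at hj; omega
    have heq : (cs.drop k)[j]'hj = cs[k + j]'hjlen := by simp [List.getElem_drop]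
    exact hns (heq ▸ H (k + j) hjlen (by omega))
  · intro H
    by_contra hno
    push Not at hno
    apply H
    intro j hj hdj
    have hj' : j - k < (cs.drop k).length := by simp [List.length_drop]; omega
    have heq : (cs.drop k)[j - k]'hj' = cs[j]'hj := by
      rw [List.getElem_drop]
      congr 1
      omega
    have := hno (j - k) hj' (by omega)
    rw [heq] at this
    simpa using this

-- loop-tail lemmas
theorem pvAloop1_skipset (cs : List Char) (m : Int) :
    ∀ (l : List Char) (a : Int), (∀ c ∈ l, c ∈ pvSkip) →
      pvAloop1 cs m (PySem.List.enumerate l a) = none := by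
  intro l
  induction l with
  | nil => intro a _; rfl
  | cons c tl ih =>
    intro a h
    rw [PySem.List.enumerate_cons]
    simp only [pvAloop1]
    rw [if_neg (pv_skip_not_sent (h c (by simp)))]
    split
    · exact ih (a + 1) (fun x hx => h x (by simp [hx]))
    · exact ih (a + 1) (fun x hx => h x (by simp [hx]))

theorem pvAloop2_small (cs : List Char) (m : Int) (hdom : ∀ c ∈ cs, pvDomChar c = true) :
    ∀ (l : List Char) (t : Nat), l = cs.drop t →
      ¬ (2 ≤ (pvBlasts cs).1 - ((pvBwhileK cs t : Nat) : Int)) →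
      pvAloop2 cs m (PySem.List.enumerate l (t : Int)) = none := by
  intro l
  induction l with
  | nil => intro t _ _; rfl
  | cons c tl ih =>
    intro t hl hsmall
    have ht : t < cs.length := by
      by_contra h'
      rw [List.drop_eq_nil_of_le (by omega)] at hl
      simp at hl
    have hdec : c :: tl = cs[t] :: cs.drop (t + 1) := by
      rw [hl]; exact List.drop_eq_getElem_cons ht
    obtain ⟨hc, htl⟩ : c = cs[t] ∧ tl = cs.drop (t + 1) := by
      injection hdec with h1 h2; exact ⟨h1, h2⟩
    have hstep : ¬ (2 ≤ (pvBlasts cs).1 - ((pvBwhileK cs (t + 1) : Nat) : Int)) := by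
      have := pvBwhileK_step cs t
      omega
    have hrec : pvAloop2 cs m (PySem.List.enumerate tl ((t : Int) + 1)) = none := by
      have hcast : (t : Int) + 1 = ((t + 1 : Nat) : Int) := by push_cast; ring
      rw [hcast]
      exact ih (t + 1) htl hstep
    rw [PySem.List.enumerate_cons]
    simp only [pvAloop2]
    split
    · exact hrec
    · by_cases hph : c ∈ pvPhrase
      · rw [if_pos hph]
        have hcast : (t : Int) + 1 = ((t + 1 : Nat) : Int) := by push_cast; ring
        rw [hcast, PySem.List.slice_from_natCast]
        rw [if_neg (by rw [pv_cond2 cs hdom t ht]; exact hstep)]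
        exact hrec
      · rw [if_neg hph]
        exact hrec

theorem pvAloop1_prefix (cs : List Char) (m : Int) :
    ∀ (pre : List Char) (a : Int) (tail : List (Int × Char)),
      (∀ k : Nat, k < pre.length → a + k < m) →
      pvAloop1 cs m (PySem.List.enumerate pre a ++ tail) = pvAloop1 cs m tail := by
  intro pre
  induction pre with
  | nil => intro a tail _; rfl
  | cons c tl ih =>
    intro a tail h
    rw [PySem.List.enumerate_cons, List.cons_append]
    simp only [pvAloop1]
    rw [if_pos (by have := h 0 (by simp); simpa using this)]
    exact ih (a + 1) tail (fun k hk => by have := h (k + 1) (by simpa using hk); push_cast at this ⊢; omega)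

theorem pvAloop2_prefix (cs : List Char) (m : Int) :
    ∀ (pre : List Char) (a : Int) (tail : List (Int × Char)),
      (∀ k : Nat, k < pre.length → a + k < m) →
      pvAloop2 cs m (PySem.List.enumerate pre a ++ tail) = pvAloop2 cs m tail := by
  intro pre
  induction pre with
  | nil => intro a tail _; rfl
  | cons c tl ih =>
    intro a tail h
    rw [PySem.List.enumerate_cons, List.cons_append]
    simp only [pvAloop2]
    rw [if_pos (by have := h 0 (by simp); simpa using this)]
    exact ih (a + 1) tail (fun k hk => by have := h (k + 1) (by simpa using hk); push_cast at this ⊢; omega)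

-- the two main alignments
theorem pvE1 (cs : List Char) (m : Int) (hdom : ∀ c ∈ cs, pvDomChar c = true) :
    ∀ (l : List Char) (t : Nat), l = cs.drop t → m ≤ (t : Int) →
      pvAloop1 cs m (PySem.List.enumerate l (t : Int)) =
        pvBscan1 (pvBlasts cs).1 (pvBlasts cs).2 l t := by
  intro l
  induction l with
  | nil => intro t _ _; rfl
  | cons c tl ih =>
    intro t hl hm
    have ht : t < cs.length := by
      by_contra h'
      rw [List.drop_eq_nil_of_le (by omega)] at hl
      simp at hl
    have hdec : c :: tl = cs[t] :: cs.drop (t + 1) := by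
      rw [hl]; exact List.drop_eq_getElem_cons ht
    obtain ⟨hc, htl⟩ : c = cs[t] ∧ tl = cs.drop (t + 1) := by
      injection hdec with h1 h2; exact ⟨h1, h2⟩
    have hcast : (t : Int) + 1 = ((t + 1 : Nat) : Int) := by push_cast; ring
    rw [PySem.List.enumerate_cons]
    simp only [pvAloop1, pvBscan1]
    rw [if_neg (by omega)]
    by_cases hsent : c ∈ pvSent
    · rw [if_pos hsent, if_pos hsent]
      rw [hcast, PySem.List.slice_from_natCast]
      by_cases h1 : (pvBlasts cs).1 ≤ (t : Int)
      · rw [if_pos ((pv_cond1a cs hdom t).2 h1), if_pos h1]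
      · rw [if_neg (fun hh => h1 ((pv_cond1a cs hdom t).1 hh)), if_neg h1]
        by_cases h2 : (t : Int) < (pvBlasts cs).2
        · rw [if_pos ((pv_cond1b cs t).2 h2), if_pos h2]
        · rw [if_neg (fun hh => h2 ((pv_cond1b cs t).1 hh)), if_neg h2]
          apply pvAloop1_skipset
          have h2' := h2
          rw [pv_ls_lt_iff cs t] at h2'
          push Not at h2'
          rw [htl]
          exact h2'
    · rw [if_neg hsent, if_neg hsent]
      rw [hcast]
      exact ih (t + 1) htl (by push_cast; omega)

theorem pvE2 (cs : List Char) (m : Int) (hdom : ∀ c ∈ cs, pvDomChar c = true) :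
    ∀ (l : List Char) (t : Nat), l = cs.drop t → m ≤ (t : Int) →
      pvAloop2 cs m (PySem.List.enumerate l (t : Int)) = pvBscan2 cs (pvBlasts cs).1 l t := by
  intro l
  induction l with
  | nil => intro t _ _; rfl
  | cons c tl ih =>
    intro t hl hm
    have ht : t < cs.length := by
      by_contra h'
      rw [List.drop_eq_nil_of_le (by omega)] at hl
      simp at hl
    have hdec : c :: tl = cs[t] :: cs.drop (t + 1) := by
      rw [hl]; exact List.drop_eq_getElem_cons ht
    obtain ⟨hc, htl⟩ : c = cs[t] ∧ tl = cs.drop (t + 1) := by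
      injection hdec with h1 h2; exact ⟨h1, h2⟩
    have hcast : (t : Int) + 1 = ((t + 1 : Nat) : Int) := by push_cast; ring
    rw [PySem.List.enumerate_cons]
    simp only [pvAloop2, pvBscan2]
    rw [if_neg (by omega)]
    by_cases hph : c ∈ pvPhrase
    · rw [if_pos hph, if_pos hph]
      rw [hcast, PySem.List.slice_from_natCast]
      by_cases hcond : 2 ≤ (pvBlasts cs).1 - ((pvBwhileK cs (t + 1) : Nat) : Int)
      · rw [if_pos ((pv_cond2 cs hdom t ht).2 hcond), if_pos hcond]
      · rw [if_neg (fun hh => hcond ((pv_cond2 cs hdom t ht).1 hh)), if_neg hcond]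
        exact pvAloop2_small cs m hdom tl (t + 1) htl hcond
    · rw [if_neg hph, if_neg hph]
      rw [hcast]
      exact ih (t + 1) htl (by push_cast; omega)

-- ===== VERDICT (by name: the statement is the Claim_ definition above) =====
theorem find_phrase_break_spec : Claim_equal_find_phrase_break := by
  intro text m hd
  unfold Spec_find_phrase_break
  have hdom : ∀ c ∈ text.toList, pvDomChar c = true := by
    have hs : pvDomStr text = true := by
      unfold Dom_find_phrase_break at hd
      exact (Bool.and_eq_true _ _ ▸ hd).1
    simpa [pvDomStr, List.all_eq_true] using hs
  by_cases hn : ((text.toList.length : Int) < m)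
  · simp only [find_phrase_break, find_phrase_break_alt]
    rw [if_pos hn, if_pos hn]
  · have hml : m ≤ (text.toList.length : Int) := by omega
    have hsl : (max m 0).toNat ≤ text.toList.length := by omega
    have htake : (text.toList.take (max m 0).toNat).length = (max m 0).toNat := by
      rw [List.length_take]
      omega
    have hstart : ((0 : Int) + ((text.toList.take (max m 0).toNat).length : Int)) =
        (((max m 0).toNat : Nat) : Int) := by
      rw [htake]
      omega
    have henum : PySem.List.enumerate text.toList (0 : Int) =
        PySem.List.enumerate (text.toList.take (max m 0).toNat) 0 ++
          PySem.List.enumerate (text.toList.drop (max m 0).toNat)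
            (((max m 0).toNat : Nat) : Int) := by
      conv_lhs => rw [← List.take_append_drop (max m 0).toNat text.toList]
      rw [PySem.List.enumerate_append, hstart]
    have hpre : ∀ k : Nat, k < (text.toList.take (max m 0).toNat).length → (0 : Int) + k < m := by
      intro k hk
      rw [htake] at hk
      omega
    have hm' : m ≤ (((max m 0).toNat : Nat) : Int) := by omega
    have h1 : pvAloop1 text.toList m (PySem.List.enumerate text.toList 0) =
        pvBscan1 (pvBlasts text.toList).1 (pvBlasts text.toList).2
          (text.toList.drop (max m 0).toNat) (max m 0).toNat := by
      rw [henum, pvAloop1_prefix text.toList m _ 0 _ hpre]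
      exact pvE1 text.toList m hdom _ (max m 0).toNat rfl hm'
    have h2 : pvAloop2 text.toList m (PySem.List.enumerate text.toList 0) =
        pvBscan2 text.toList (pvBlasts text.toList).1
          (text.toList.drop (max m 0).toNat) (max m 0).toNat := by
      rw [henum, pvAloop2_prefix text.toList m _ 0 _ hpre]
      exact pvE2 text.toList m hdom _ (max m 0).toNat rfl hm'
    simp only [find_phrase_break, find_phrase_break_alt]
    rw [if_neg hn, if_neg hn, h1, h2]
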